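-- pv_equiv track=rewrite | github.com/JendaPlhak/math_in_python | KvagrsWork/4_task/polygon.py | scoreVectorToPoints
-- ===== SOURCE A (Python) =====
-- def vectorizePoints(A,B):
--
--     return [ B[0] - A[0], B[1] - A[1] ]
--
-- def determinant(u, v):
-- # determinant for 2x2 matrix
--
--     # | u0  v0 | = u0*v1 - u1*v0
--     # | u1  v1 |
--
--     return u[0] * v[1] - u[1] * v[0]
--
-- def scoreVectorToPoints(fixed_point, vector, points):
-- # score = (+, -, 0)
--
--     score = [0,0,0]
--
--     for i in range( len(points) ):
--         if determinant( vector, vectorizePoints( fixed_point, points[i] ) ) > 0: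
--             score[0] += 1
--         elif determinant( vector, vectorizePoints( fixed_point, points[i] ) ) < 0:
--             score[1] -= 1
--         else:
--             score[2] -= 1
--
--     return sum(score)
-- ===== SOURCE B (Python) =====
-- def scoreVectorToPoints(fixed_point, vector, points):
--     # Divide-and-conquer: the score is additive over any split of the point list,
--     # and a single point contributes +1 if its cross product with the vector is
--     # strictly positive, else -1 (negative and zero alike).
--     def side(p):
--         d = vector[0] * (p[1] - fixed_point[1]) - vector[1] * (p[0] - fixed_point[0])
--         return 1 if d > 0 else -1
--
--     def go(lo, hi):
--         if hi - lo == 0: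
--             return 0
--         if hi - lo == 1:
--             return side(points[lo])
--         mid = (lo + hi) // 2
--         return go(lo, mid) + go(mid, hi)
--
--     return go(0, len(points))
-- ===== Notes on version B (the rewrite author's own statement) =====
-- stated objective: alternative
-- what changed: B scores recursively by divide-and-conquer on index halves, each point contributing +1 or -1 once, instead of A's single indexed loop maintaining a three-bucket score list with a three-way branch and a twice-evaluated determinant.
import Mathlib
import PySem

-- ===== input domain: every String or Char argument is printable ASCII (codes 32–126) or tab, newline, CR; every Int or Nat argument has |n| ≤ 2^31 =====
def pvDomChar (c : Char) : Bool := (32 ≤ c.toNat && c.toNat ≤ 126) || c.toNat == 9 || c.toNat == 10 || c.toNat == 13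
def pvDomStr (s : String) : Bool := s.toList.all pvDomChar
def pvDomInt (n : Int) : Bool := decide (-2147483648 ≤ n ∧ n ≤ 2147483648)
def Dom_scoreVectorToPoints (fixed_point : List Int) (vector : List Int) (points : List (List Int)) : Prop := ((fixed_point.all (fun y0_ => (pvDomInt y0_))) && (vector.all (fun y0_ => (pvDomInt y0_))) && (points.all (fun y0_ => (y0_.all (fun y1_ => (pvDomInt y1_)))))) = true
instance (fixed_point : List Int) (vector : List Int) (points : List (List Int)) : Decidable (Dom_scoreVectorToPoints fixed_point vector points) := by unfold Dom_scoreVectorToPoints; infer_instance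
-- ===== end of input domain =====

-- B scores by divide-and-conquer on index halves, each point contributing +1 or -1 once,
-- instead of A's indexed loop over a three-bucket score list (objective: alternative).

-- ===== PORT A =====
-- vectorizePoints(A, B)
def pvVectorize (A B : List Int) : List Int :=
  [PySem.List.pyGetD B 0 0 - PySem.List.pyGetD A 0 0,
   PySem.List.pyGetD B 1 0 - PySem.List.pyGetD A 1 0]

-- determinant(u, v)
def pvDet (u v : List Int) : Int :=
  PySem.List.pyGetD u 0 0 * PySem.List.pyGetD v 1 0 -
  PySem.List.pyGetD u 1 0 * PySem.List.pyGetD v 0 0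

def scoreVectorToPoints (fixed_point : List Int) (vector : List Int) (points : List (List Int)) : Int :=
  let score : Int × Int × Int :=
    (PySem.List.pyRange 0 points.length 1).foldl (fun s i =>
      if pvDet vector (pvVectorize fixed_point (PySem.List.pyGetD points i [])) > 0 then (s.1 + 1, s.2.1, s.2.2)
      else if pvDet vector (pvVectorize fixed_point (PySem.List.pyGetD points i [])) < 0 then (s.1, s.2.1 - 1, s.2.2)
      else (s.1, s.2.1, s.2.2 - 1)) (0, 0, 0)
  score.1 + score.2.1 + score.2.2

-- ===== PORT B =====
-- side(p): +1 for a strictly positive cross product, -1 otherwise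
def pvSide (fixed_point vector p : List Int) : Int :=
  if PySem.List.pyGetD vector 0 0 * (PySem.List.pyGetD p 1 0 - PySem.List.pyGetD fixed_point 1 0)
   - PySem.List.pyGetD vector 1 0 * (PySem.List.pyGetD p 0 0 - PySem.List.pyGetD fixed_point 0 0) > 0
  then 1 else -1

-- go(lo, hi): divide-and-conquer over the index range [lo, hi); the extra fuel argument
-- (initially hi - lo, strictly decreasing) only makes the recursion structural, the
-- branches are Source B's.
def pvGo (fixed_point vector : List Int) (points : List (List Int)) : Nat → Nat → Nat → Int
  | 0, _, _ => 0
  | fuel + 1, lo, hi =>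
    if hi - lo = 0 then 0
    else if hi - lo = 1 then pvSide fixed_point vector (PySem.List.pyGetD points (lo : Int) [])
    else pvGo fixed_point vector points fuel lo ((lo + hi) / 2) +
         pvGo fixed_point vector points fuel ((lo + hi) / 2) hi

def scoreVectorToPoints_alt (fixed_point : List Int) (vector : List Int) (points : List (List Int)) : Int :=
  pvGo fixed_point vector points points.length 0 points.length

-- ===== PRECONDITION & SPEC =====
-- Pre_ excludes exactly the inputs on which Python A raises IndexError: some point (or, when
-- points is nonempty, fixed_point or vector) shorter than 2.
def Pre_scoreVectorToPoints (fixed_point : List Int) (vector : List Int) (points : List (List Int)) : Prop :=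
  (points ≠ [] → 2 ≤ fixed_point.length ∧ 2 ≤ vector.length) ∧ ∀ p ∈ points, 2 ≤ p.length
instance (fixed_point : List Int) (vector : List Int) (points : List (List Int)) : Decidable (Pre_scoreVectorToPoints fixed_point vector points) := by unfold Pre_scoreVectorToPoints; infer_instance
def pvWitness_scoreVectorToPoints : List Int × List Int × List (List Int) := ([0, 0], [1, 0], [[1, 1], [2, -1], [3, 0]])

def Spec_scoreVectorToPoints (fixed_point : List Int) (vector : List Int) (points : List (List Int)) (out : Int) : Prop := out = scoreVectorToPoints_alt fixed_point vector points
instance (fixed_point : List Int) (vector : List Int) (points : List (List Int)) (out : Int) : Decidable (Spec_scoreVectorToPoints fixed_point vector points out) := by unfold Spec_scoreVectorToPoints; infer_instance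

-- ===== CLAIM (what is proved, stated in full; the proofs are below) =====
def Claim_equal_scoreVectorToPoints : Prop := ∀ (fixed_point : List Int) (vector : List Int) (points : List (List Int)), Dom_scoreVectorToPoints fixed_point vector points → Pre_scoreVectorToPoints fixed_point vector points → Spec_scoreVectorToPoints fixed_point vector points (scoreVectorToPoints fixed_point vector points)

-- ===== LEMMAS AND PROOFS =====

-- A's loop invariant: folding A's step over any point list adds (sum of sides) to the total.
theorem pv_fold_key (fixed_point vector : List Int) :
    ∀ (pts : List (List Int)) (a b c : Int),
      (let r := pts.foldl (fun (s : Int × Int × Int) (p : List Int) =>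
          if pvDet vector (pvVectorize fixed_point p) > 0 then (s.1 + 1, s.2.1, s.2.2)
          else if pvDet vector (pvVectorize fixed_point p) < 0 then (s.1, s.2.1 - 1, s.2.2)
          else (s.1, s.2.1, s.2.2 - 1)) (a, b, c)
       r.1 + r.2.1 + r.2.2) =
      a + b + c + (pts.map (pvSide fixed_point vector)).sum := by
  intro pts
  induction pts with
  | nil => intro a b c; simp
  | cons p rest ih =>
    intro a b c
    have hside : pvSide fixed_point vector p =
        if pvDet vector (pvVectorize fixed_point p) > 0 then (1 : Int) else -1 := by
      simp [pvSide, pvDet, pvVectorize, PySem.List.pyGetD]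
    simp only [List.foldl_cons, List.map_cons, List.sum_cons, hside]
    split_ifs with h1 h2 <;> rw [ih] <;> ring

-- B's recursion computes the sum of sides over the index segment [lo, hi).
theorem pvGo_eq (fixed_point vector : List Int) (points : List (List Int)) :
    ∀ (fuel lo hi : Nat), hi - lo ≤ fuel → hi ≤ points.length →
      pvGo fixed_point vector points fuel lo hi =
        (((points.drop lo).take (hi - lo)).map (pvSide fixed_point vector)).sum := by
  intro fuel
  induction fuel with
  | zero =>
    intro lo hi hk hhi
    have h0 : hi - lo = 0 := by omega
    simp [pvGo, h0]
  | succ fuel ih =>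
    intro lo hi hk hhi
    rw [pvGo]
    by_cases h0 : hi - lo = 0
    · simp [h0]
    · by_cases h1 : hi - lo = 1
      · have hlo : lo < points.length := by omega
        rw [if_neg h0, if_pos h1, h1]
        have hget : PySem.List.pyGetD points (lo : Int) [] = points[lo] := by
          rw [PySem.List.pyGetD_natCast]
          simp [List.getD, hlo]
        rw [hget]
        have hlo2 : lo < (List.map (pvSide fixed_point vector) points).length := by
          simpa using hlo
        simp [List.drop_eq_getElem_cons hlo2]
      · have hmid : lo < (lo + hi) / 2 ∧ (lo + hi) / 2 < hi := by omega
        rw [if_neg h0, if_neg h1]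
        rw [ih lo ((lo + hi) / 2) (by omega) (by omega),
            ih ((lo + hi) / 2) hi (by omega) hhi]
        have hsplit : (points.drop lo).take (hi - lo) =
            (points.drop lo).take ((lo + hi) / 2 - lo) ++
            (points.drop ((lo + hi) / 2)).take (hi - (lo + hi) / 2) := by
          have : hi - lo = ((lo + hi) / 2 - lo) + (hi - (lo + hi) / 2) := by omega
          rw [this, List.take_add, List.drop_drop,
              show lo + ((lo + hi) / 2 - lo) = (lo + hi) / 2 from by omega]
        rw [hsplit]
        simp

-- ===== VERDICT (by name: the statement is the Claim_ definition above) =====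
theorem scoreVectorToPoints_spec : Claim_equal_scoreVectorToPoints := by
  intro fixed_point vector points _ _
  unfold Spec_scoreVectorToPoints scoreVectorToPoints scoreVectorToPoints_alt
  rw [PySem.List.foldl_pyRange_zero_pyGetD' points ([] : List Int)
        (fun (s : Int × Int × Int) (p : List Int) =>
          if pvDet vector (pvVectorize fixed_point p) > 0 then (s.1 + 1, s.2.1, s.2.2)
          else if pvDet vector (pvVectorize fixed_point p) < 0 then (s.1, s.2.1 - 1, s.2.2)
          else (s.1, s.2.1, s.2.2 - 1)) (0, 0, 0)]
  rw [pv_fold_key]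
  rw [pvGo_eq fixed_point vector points points.length 0 points.length (by omega) (le_refl _)]
  simp
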